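-- pv_equiv track=rewrite | github.com/onera/Cassiopee | Cassiopee/Post/Post/PyTree.py | checkVariables___
-- ===== SOURCE A (Python) =====
-- def checkVariables___(vars):
--     loc = -1 # unknown
--     for i in vars:
--         s = i.find('centers:')
--         if s != -1: # found
--             if loc == -1: loc = 1
--             elif loc == 0: return -1
--         else:
--             if loc == -1: loc = 0
--             elif loc == 1: return -1
--     return loc
-- ===== SOURCE B (Python) =====
-- def checkVariables___(variables):
--     flags = {('centers:' in v) for v in variables}
--     if len(flags) != 1: return -1
--     return 1 if flags.pop() else 0
-- ===== Notes on version B (the rewrite author's own statement) =====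
-- stated objective: simpler
-- what changed: Replaces the running loc state machine with early conflict returns by collecting the set of 'centers:'-membership flags in one set comprehension and deciding from its cardinality.
import Mathlib
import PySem

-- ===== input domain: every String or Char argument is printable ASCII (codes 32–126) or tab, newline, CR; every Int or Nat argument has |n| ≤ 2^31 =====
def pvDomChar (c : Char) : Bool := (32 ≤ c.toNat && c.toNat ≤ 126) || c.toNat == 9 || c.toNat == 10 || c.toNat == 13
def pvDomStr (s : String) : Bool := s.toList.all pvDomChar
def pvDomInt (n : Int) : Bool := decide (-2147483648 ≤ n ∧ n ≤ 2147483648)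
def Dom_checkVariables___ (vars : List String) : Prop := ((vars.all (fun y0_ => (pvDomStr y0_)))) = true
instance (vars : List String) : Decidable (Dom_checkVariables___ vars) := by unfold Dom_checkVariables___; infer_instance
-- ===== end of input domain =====

-- B replaces A's running loc state machine (with early conflict returns) by collecting the set
-- of 'centers:'-membership flags once and deciding from its cardinality; objective: simpler.


-- ===== PORT A =====
-- the for-loop over vars with the running state loc and early returns
def checkVariablesGo : List String → Int → Int
  | [], loc => loc
  | i :: rest, loc =>
      let s := PySem.Str.find i "centers:"
      if s ≠ -1 then
        if loc = -1 then checkVariablesGo rest 1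
        else if loc = 0 then -1
        else checkVariablesGo rest loc
      else
        if loc = -1 then checkVariablesGo rest 0
        else if loc = 1 then -1
        else checkVariablesGo rest loc

def checkVariables___ (vars : List String) : Int :=
  checkVariablesGo vars (-1)

-- ===== PORT B =====
-- the flag 'centers:' in v of Source B's set comprehension
def centersFlag (v : String) : Bool := PySem.Str.isIn "centers:" v

def checkVariables____alt (vars : List String) : Int :=
  let flags : PySem.Set Bool := PySem.Set.ofList (vars.map centersFlag)
  if flags.length ≠ 1 then -1
  else if flags.headD false then 1 else 0

-- ===== PRECONDITION & SPEC =====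
def Spec_checkVariables___ (vars : List String) (out : Int) : Prop := out = checkVariables____alt vars
instance (vars : List String) (out : Int) : Decidable (Spec_checkVariables___ vars out) := by unfold Spec_checkVariables___; infer_instance

-- ===== CLAIM (what is proved, stated in full; the proofs are below) =====
def Claim_equal_checkVariables___ : Prop := ∀ (vars : List String), Dom_checkVariables___ vars → Spec_checkVariables___ vars (checkVariables___ vars)

-- ===== LEMMAS AND PROOFS =====

-- A's find-test agrees with B's membership flag
theorem find_flag (i : String) :
    (PySem.Str.find i "centers:" ≠ -1) ↔ centersFlag i = true := by
  rw [centersFlag, PySem.Str.find_ne_neg_one_iff, PySem.Str.isIn_iff_infix]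

-- adding booleans to a two-element boolean set changes nothing
theorem foldl_add_two (l : List Bool) (b : Bool) :
    l.foldl PySem.Set.add [b, !b] = [b, !b] := by
  induction l with
  | nil => rfl
  | cons x l ih =>
      have hx : PySem.Set.add [b, !b] x = [b, !b] := by
        cases x <;> cases b <;> rfl
      simp [List.foldl, hx, ih]

-- a boolean set grown from a singleton: stays [b] iff all further flags equal b
theorem foldl_add_one (l : List Bool) (b : Bool) :
    l.foldl PySem.Set.add [b] =
      if l.all (fun x => x == b) then [b] else [b, !b] := by
  induction l with
  | nil => rfl
  | cons x l ih =>
      by_cases hxb : x = b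
      · subst hxb
        have hx : PySem.Set.add [x] x = [x] := by cases x <;> rfl
        simp [List.foldl, hx, ih]
      · have hx : x = !b := by cases x <;> cases b <;> simp_all
        subst hx
        have hadd : PySem.Set.add [b] (!b) = [b, !b] := by cases b <;> rfl
        have hall : (((!b) :: l).all (fun x => x == b)) = false := by
          cases b <;> simp [List.all]
        simp [List.foldl, hadd, foldl_add_two, hall]

-- A's loop from a settled state loc = 0/1
theorem go_settled (rest : List String) (b : Bool) :
    checkVariablesGo rest (if b then 1 else 0) =
      if rest.all (fun v => centersFlag v == b)
      then (if b then 1 else 0) else -1 := by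
  induction rest with
  | nil => simp [checkVariablesGo]
  | cons j rest ih =>
      by_cases hj : PySem.Str.find j "centers:" ≠ -1
      · have hf : centersFlag j = true := (find_flag j).mp hj
        simp at hj
        cases b <;> simp at ih <;> simp [checkVariablesGo, hj, hf, ih]
      · have hf : centersFlag j = false := by
          cases h : centersFlag j
          · rfl
          · exact absurd ((find_flag j).mpr h) hj
        simp at hj
        cases b <;> simp at ih <;> simp [checkVariablesGo, hj, hf, ih]

-- ===== VERDICT (by name: the statement is the Claim_ definition above) =====
theorem checkVariables____spec : Claim_equal_checkVariables___ := by
  intro vars _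
  unfold Spec_checkVariables___ checkVariables___ checkVariables____alt
  dsimp only
  cases vars with
  | nil => rfl
  | cons i rest =>
      have hof : PySem.Set.ofList ((i :: rest).map centersFlag) =
          (rest.map centersFlag).foldl PySem.Set.add
            [centersFlag i] := by
        rw [PySem.Set.ofList_eq_foldl, List.map_cons, List.foldl_cons]
        simp [PySem.Set.add]
      have hA : checkVariablesGo (i :: rest) (-1) =
          checkVariablesGo rest (if centersFlag i then 1 else 0) := by
        by_cases hj : PySem.Str.find i "centers:" ≠ -1
        · have hbt : centersFlag i = true := (find_flag i).mp hj
          simp at hj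
          simp [checkVariablesGo, hj, hbt]
        · have hbf : centersFlag i = false := by
            cases h : centersFlag i
            · rfl
            · exact absurd ((find_flag i).mpr h) hj
          simp at hj
          simp [checkVariablesGo, hj, hbf]
      rw [hA, go_settled, hof, foldl_add_one]
      by_cases hall : ∀ x ∈ rest, centersFlag x = centersFlag i
      · have h1 : (rest.all fun v => centersFlag v == centersFlag i) = true := by
          simp only [List.all_map, List.all_eq_true, Function.comp, beq_iff_eq]; exact hall
        have h2 : ((List.map centersFlag rest).all fun x => x == centersFlag i) = true := by
          simp only [List.all_map, List.all_eq_true, Function.comp, beq_iff_eq]; exact hall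
        rw [if_pos h1, if_pos h2]
        simp
      · have h1 : ¬ (rest.all fun v => centersFlag v == centersFlag i) = true := by
          simpa using hall
        have h2 : ¬ ((List.map centersFlag rest).all fun x => x == centersFlag i) = true := by
          simpa using hall
        rw [if_neg h1, if_neg h2]
        simp
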